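-- pv_equiv track=rewrite | github.com/enternityFan/LeetCodePythonVersion | 回溯/剑指 Offer II 086. 分割回文子字符串.py | getDP
-- ===== SOURCE A (Python) =====
-- def getDP(s):
--     N = len(s)
--     dp = [[False for _ in range(N) ] for i in range(N)]
--     for i in range(N-1):
--         dp[i][i] = True
--         dp[i][i+1] = (s[i] == s[i+1])
--     dp[N-1][N-1] = True
--     for j in range(2,N):
--         row = 0
--         col = j
--         while row < N and col < N:
--             dp[row][col] = (s[row] == s[col] and dp[row+1][col-1])
--             row +=1
--             col +=1
--
--     return dp
-- ===== SOURCE B (Python) =====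
-- def getDP(s):
--     N = len(s)
--     dp = [[False] * N for _ in range(N)]
--     for i in range(N):
--         dp[i][i] = True
--         l, r = i - 1, i + 1
--         while l >= 0 and r < N and s[l] == s[r]:
--             dp[l][r] = True
--             l -= 1
--             r += 1
--         l, r = i, i + 1
--         while l >= 0 and r < N and s[l] == s[r]:
--             dp[l][r] = True
--             l -= 1
--             r += 1
--     return dp
-- ===== Notes on version B (the rewrite author's own statement) =====
-- stated objective: simpler
-- what changed: Replaces A's two seeding loops plus diagonal-by-diagonal DP fill using the neighbour recurrence dp[row+1][col-1] with a single center-expansion pass that marks each palindromic cell directly.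
import Mathlib
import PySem

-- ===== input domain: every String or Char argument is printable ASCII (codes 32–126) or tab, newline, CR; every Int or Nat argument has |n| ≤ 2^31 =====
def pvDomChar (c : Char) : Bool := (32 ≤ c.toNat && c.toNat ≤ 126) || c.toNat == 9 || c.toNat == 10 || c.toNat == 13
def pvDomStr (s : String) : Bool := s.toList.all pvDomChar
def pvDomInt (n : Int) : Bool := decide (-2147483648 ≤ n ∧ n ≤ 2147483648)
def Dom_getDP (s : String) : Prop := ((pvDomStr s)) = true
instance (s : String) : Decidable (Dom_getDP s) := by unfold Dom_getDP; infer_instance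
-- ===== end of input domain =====

-- B replaces A's diagonal neighbour-recurrence DP fill by center expansion: simpler, no dependence on previously computed dp cells.

-- matrix helpers shared by both ports (Python's dp[i][j] = v and dp[i][j])
def setM (dp : List (List Bool)) (i j : Nat) (v : Bool) : List (List Bool) :=
  dp.set i ((dp.getD i []).set j v)

def getM (dp : List (List Bool)) (i j : Nat) : Bool :=
  (dp.getD i []).getD j false

-- ===== PORT A =====
-- the inner `while row < N and col < N` loop of A
def diagA (cs : List Char) (N : Nat) (row col : Nat) (dp : List (List Bool)) :
    List (List Bool) :=
  if h : row < N ∧ col < N then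
    diagA cs N (row + 1) (col + 1)
      (setM dp row col ((cs.getD row ' ' == cs.getD col ' ') && getM dp (row + 1) (col - 1)))
  else dp
  termination_by N - row
  decreasing_by omega

def getDP (s : String) : List (List Bool) :=
  let cs := s.toList
  let N := cs.length
  let dp0 := List.replicate N (List.replicate N false)
  let dp1 := (List.range (N - 1)).foldl (fun dp i =>
      setM (setM dp i i true) i (i + 1) (cs.getD i ' ' == cs.getD (i + 1) ' ')) dp0
  let dp2 := setM dp1 (N - 1) (N - 1) true
  (List.range' 2 (N - 2)).foldl (fun dp j => diagA cs N 0 j dp) dp2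

-- ===== PORT B =====
-- the `while l >= 0 and r < N and s[l] == s[r]` expansion loop of B
def expandB (cs : List Char) (N : Nat) (l : Int) (r : Nat) (dp : List (List Bool)) :
    List (List Bool) :=
  if h : 0 ≤ l ∧ r < N ∧ cs.getD l.toNat ' ' == cs.getD r ' ' then
    expandB cs N (l - 1) (r + 1) (setM dp l.toNat r true)
  else dp
  termination_by N - r
  decreasing_by omega

def getDP_alt (s : String) : List (List Bool) :=
  let cs := s.toList
  let N := cs.length
  let dp0 := List.replicate N (List.replicate N false)
  (List.range N).foldl (fun dp (i : Nat) =>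
      expandB cs N ((i : Int)) (i + 1) (expandB cs N ((i : Int) - 1) (i + 1) (setM dp i i true))) dp0

-- ===== PRECONDITION & SPEC =====
-- Pre_ excludes only the empty string, on which A raises IndexError (dp[N-1][N-1] with N = 0).
def Pre_getDP (s : String) : Prop := s ≠ ""
instance (s : String) : Decidable (Pre_getDP s) := by unfold Pre_getDP; infer_instance
def pvWitness_getDP : String := "abba"

def Spec_getDP (s : String) (out : List (List Bool)) : Prop := out = getDP_alt s
instance (s : String) (out : List (List Bool)) : Decidable (Spec_getDP s out) := by unfold Spec_getDP; infer_instance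

-- ===== CLAIM (what is proved, stated in full; the proofs are below) =====
def Claim_equal_getDP : Prop := ∀ (s : String), Dom_getDP s → Pre_getDP s → Spec_getDP s (getDP s)

-- ===== LEMMAS AND PROOFS =====

-- `pal cs i j` : the substring cs[i..j] is a palindrome (true when j ≤ i)
def pal (cs : List Char) (i j : Nat) : Bool :=
  if j ≤ i then true
  else (cs.getD i ' ' == cs.getD j ' ') && pal cs (i + 1) (j - 1)
  termination_by j - i
  decreasing_by omega

def Shape (N : Nat) (dp : List (List Bool)) : Prop :=
  dp.length = N ∧ ∀ k, k < N → (dp.getD k []).length = N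

def Good (cs : List Char) (N : Nat) (dp : List (List Bool)) : Prop :=
  Shape N dp ∧ ∀ a b, a < N → b < N →
    (getM dp a b = true ↔ a ≤ b ∧ pal cs a b = true)

theorem bool_ext {a b : Bool} (h : a = true ↔ b = true) : a = b := by
  cases a <;> cases b <;> simp_all

theorem getD_set_self {α : Type} (l : List α) (i : Nat) (v d : α) (h : i < l.length) :
    (l.set i v).getD i d = v := by
  simp [List.getD_eq_getElem?_getD, h]

theorem getD_set_ne {α : Type} (l : List α) (i k : Nat) (v d : α) (h : k ≠ i) :
    (l.set i v).getD k d = l.getD k d := by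
  simp [List.getD_eq_getElem?_getD, List.getElem?_set_ne, Ne.symm h]

theorem getD_replicate' {α : Type} (n k : Nat) (x d : α) :
    (List.replicate n x).getD k d = if k < n then x else d := by
  simp [List.getD_eq_getElem?_getD, List.getElem?_replicate]; split <;> simp

theorem shape_setM {N : Nat} {dp : List (List Bool)} (h : Shape N dp) (i j : Nat) (v : Bool) :
    Shape N (setM dp i j v) := by
  obtain ⟨h1, h2⟩ := h
  refine ⟨by simp [setM, h1], fun k hk => ?_⟩
  by_cases hki : k = i
  · subst hki
    by_cases hlt : k < dp.length
    · rw [setM, getD_set_self _ _ _ _ hlt, List.length_set]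
      simpa [List.getD_eq_getElem?_getD] using h2 k hk
    · rw [setM, List.set_eq_of_length_le (by omega)]; exact h2 k hk
  · rw [setM, getD_set_ne _ _ _ _ _ hki]; exact h2 k hk

theorem getM_setM_self {N : Nat} {dp : List (List Bool)} (h : Shape N dp) {i j : Nat}
    (hi : i < N) (hj : j < N) (v : Bool) : getM (setM dp i j v) i j = v := by
  obtain ⟨h1, h2⟩ := h
  rw [getM, setM, getD_set_self _ _ _ _ (by omega), getD_set_self _ _ _ _ (by rw [h2 i hi]; omega)]

theorem getM_setM_ne {dp : List (List Bool)} {i j a b : Nat} (v : Bool)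
    (h : ¬ (a = i ∧ b = j)) : getM (setM dp i j v) a b = getM dp a b := by
  by_cases hai : a = i
  · subst hai
    have hbj : b ≠ j := fun hb => h ⟨rfl, hb⟩
    by_cases hlt : a < dp.length
    · rw [getM, setM, getD_set_self _ _ _ _ hlt, getD_set_ne _ _ _ _ _ hbj]; rfl
    · rw [setM, List.set_eq_of_length_le (by omega)]
  · rw [getM, setM, getD_set_ne _ _ _ _ _ hai]; rfl

theorem getM_eq_getElem {dp : List (List Bool)} {i j : Nat} (hi : i < dp.length)
    (hj : j < (dp[i]).length) : getM dp i j = dp[i][j] := by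
  simp [getM, List.getD_eq_getElem?_getD, hi, hj]

theorem getM_dp0 (N a b : Nat) : getM (List.replicate N (List.replicate N false)) a b = false := by
  rw [getM, getD_replicate']
  split
  · rw [getD_replicate']; split <;> rfl
  · rfl

theorem shape_dp0 (N : Nat) : Shape N (List.replicate N (List.replicate N false)) := by
  refine ⟨by simp, fun k hk => ?_⟩
  rw [getD_replicate', if_pos hk]; simp

theorem mat_ext {N : Nat} {d e : List (List Bool)} (hd : Shape N d) (he : Shape N e)
    (h : ∀ i j, i < N → j < N → getM d i j = getM e i j) : d = e := by
  obtain ⟨hd1, hd2⟩ := hd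
  obtain ⟨he1, he2⟩ := he
  apply List.ext_getElem (by omega)
  intro i h1 h2
  have hdi : (d[i]).length = N := by
    have := hd2 i (by omega)
    rwa [List.getD_eq_getElem?_getD, List.getElem?_eq_getElem h1] at this
  have hei : (e[i]).length = N := by
    have := he2 i (by omega)
    rwa [List.getD_eq_getElem?_getD, List.getElem?_eq_getElem h2] at this
  apply List.ext_getElem (by omega)
  intro j hj1 hj2
  rw [← getM_eq_getElem h1 hj1, ← getM_eq_getElem h2 hj2]
  exact h i j (by omega) (by omega)

theorem pal_le (cs : List Char) {i j : Nat} (h : j ≤ i) : pal cs i j = true := by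
  rw [pal]; simp [h]

theorem pal_step (cs : List Char) {i j : Nat} (h : i < j) :
    pal cs i j = ((cs.getD i ' ' == cs.getD j ' ') && pal cs (i + 1) (j - 1)) := by
  rw [pal]; simp [Nat.not_le.mpr h]

theorem pal_false (cs : List Char) (l r : Nat) (hlr : l < r)
    (hf : (cs.getD l ' ' == cs.getD r ' ') = false) :
    ∀ a b, a ≤ l → a + b = l + r → pal cs a b = false := by
  suffices H : ∀ k a b, l - a = k → a ≤ l → a + b = l + r → pal cs a b = false by
    intro a b h1 h2; exact H (l - a) a b rfl h1 h2
  intro k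
  induction k with
  | zero =>
    intro a b hk ha hab
    have hal : a = l := by omega
    have hbr : b = r := by omega
    subst hal; subst hbr
    rw [pal_step cs hlr, hf]; rfl
  | succ k ih =>
    intro a b hk ha hab
    have hab' : a < b := by omega
    rw [pal_step cs hab', ih (a + 1) (b - 1) (by omega) (by omega) (by omega)]
    simp

-- ===== A side =====

def PA (cs : List Char) (N d : Nat) (dp : List (List Bool)) : Prop :=
  Shape N dp ∧ ∀ a b, a < N → b < N →
    (getM dp a b = true ↔ (a ≤ b ∧ b ≤ a + d ∧ pal cs a b = true))

theorem A_initloop (cs : List Char) (N : Nat) :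
    ∀ n, n ≤ N - 1 →
    Shape N ((List.range n).foldl (fun dp i =>
        setM (setM dp i i true) i (i + 1) (cs.getD i ' ' == cs.getD (i + 1) ' '))
        (List.replicate N (List.replicate N false))) ∧
    ∀ a b, a < N → b < N →
      (getM ((List.range n).foldl (fun dp i =>
          setM (setM dp i i true) i (i + 1) (cs.getD i ' ' == cs.getD (i + 1) ' '))
          (List.replicate N (List.replicate N false))) a b = true ↔
        (a < n ∧ (a = b ∨ (b = a + 1 ∧ (cs.getD a ' ' == cs.getD b ' ') = true)))) := by
  intro n
  induction n with
  | zero =>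
    intro _
    refine ⟨shape_dp0 N, fun a b _ _ => ?_⟩
    simp only [List.range_zero, List.foldl_nil]
    rw [getM_dp0]
    constructor
    · intro h; simp at h
    · rintro ⟨h, _⟩; omega
  | succ n ih =>
    intro hn
    obtain ⟨hsh, hinv⟩ := ih (by omega)
    rw [List.range_succ, List.foldl_append]
    set dp := (List.range n).foldl _ (List.replicate N (List.replicate N false)) with hdp
    simp only [List.foldl_cons, List.foldl_nil]
    have hnN : n < N := by omega
    have hn1N : n + 1 < N := by omega
    have hsh1 : Shape N (setM dp n n true) := shape_setM hsh n n true
    refine ⟨shape_setM hsh1 n (n + 1) _, fun a b ha hb => ?_⟩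
    by_cases hc1 : a = n ∧ b = n + 1
    · obtain ⟨rfl, rfl⟩ := hc1
      rw [getM_setM_self hsh1 hnN hn1N]
      constructor
      · intro he; exact ⟨by omega, Or.inr ⟨rfl, he⟩⟩
      · rintro ⟨_, h | ⟨_, he⟩⟩; · omega
        exact he
    · rw [getM_setM_ne _ hc1]
      by_cases hc2 : a = n ∧ b = n
      · obtain ⟨rfl, rfl⟩ := hc2
        rw [getM_setM_self hsh hnN hnN]
        simp
      · rw [getM_setM_ne _ hc2, hinv a b ha hb]
        constructor
        · rintro ⟨h1, h2⟩; exact ⟨by omega, h2⟩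
        · rintro ⟨h1, h2⟩
          refine ⟨?_, h2⟩
          rcases h2 with h2 | ⟨h2, _⟩ <;> omega

theorem A_init (cs : List Char) (N : Nat) (hN : 1 ≤ N) :
    PA cs N 1 (setM ((List.range (N - 1)).foldl (fun dp i =>
        setM (setM dp i i true) i (i + 1) (cs.getD i ' ' == cs.getD (i + 1) ' '))
        (List.replicate N (List.replicate N false))) (N - 1) (N - 1) true) := by
  obtain ⟨hsh, hinv⟩ := A_initloop cs N (N - 1) (le_refl _)
  set dp := (List.range (N - 1)).foldl _ _ with hdp
  refine ⟨shape_setM hsh _ _ _, fun a b ha hb => ?_⟩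
  by_cases hc : a = N - 1 ∧ b = N - 1
  · obtain ⟨rfl, rfl⟩ := hc
    rw [getM_setM_self hsh (by omega) (by omega)]
    simp [pal_le cs (le_refl (N - 1))]
  · rw [getM_setM_ne _ hc, hinv a b ha hb]
    constructor
    · rintro ⟨h1, h2 | ⟨h2, h3⟩⟩
      · subst h2; exact ⟨le_refl _, by omega, pal_le cs (le_refl a)⟩
      · subst h2
        refine ⟨by omega, by omega, ?_⟩
        have hp : pal cs (a + 1) (a + 1 - 1) = true := pal_le cs (by omega)
        rw [pal_step cs (by omega), hp, h3]
        rfl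
    · rintro ⟨h1, h2, h3⟩
      by_cases hab : a = b
      · exact ⟨by omega, Or.inl hab⟩
      · have hb1 : b = a + 1 := by omega
        subst hb1
        refine ⟨by omega, Or.inr ⟨rfl, ?_⟩⟩
        have hp : pal cs (a + 1) (a + 1 - 1) = true := pal_le cs (by omega)
        rw [pal_step cs (by omega), hp] at h3
        simpa using h3

theorem diagA_spec (cs : List Char) (N d : Nat) (hd : 2 ≤ d) :
    ∀ fuel row dp, N ≤ row + fuel → Shape N dp →
    (∀ a b, a < N → b < N →
      (getM dp a b = true ↔ (a ≤ b ∧ (b + 1 ≤ a + d ∨ (b = a + d ∧ a < row)) ∧ pal cs a b = true))) →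
    Shape N (diagA cs N row (row + d) dp) ∧
    ∀ a b, a < N → b < N →
      (getM (diagA cs N row (row + d) dp) a b = true ↔ (a ≤ b ∧ b ≤ a + d ∧ pal cs a b = true)) := by
  intro fuel
  induction fuel with
  | zero =>
    intro row dp hfuel hsh hinv
    rw [diagA, dif_neg (by omega)]
    refine ⟨hsh, fun a b ha hb => ?_⟩
    rw [hinv a b ha hb]
    constructor
    · rintro ⟨h1, h2, h3⟩; exact ⟨h1, by omega, h3⟩
    · rintro ⟨h1, h2, h3⟩; exact ⟨h1, by omega, h3⟩
  | succ fuel ih =>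
    intro row dp hfuel hsh hinv
    by_cases hcond : row < N ∧ row + d < N
    · rw [diagA, dif_pos hcond]
      have hg : getM dp (row + 1) (row + d - 1) = pal cs (row + 1) (row + d - 1) := by
        apply bool_ext
        rw [hinv (row + 1) (row + d - 1) (by omega) (by omega)]
        constructor
        · rintro ⟨_, _, h3⟩; exact h3
        · intro h3; exact ⟨by omega, by omega, h3⟩
      rw [hg]
      have hv : ((cs.getD row ' ' == cs.getD (row + d) ' ') && pal cs (row + 1) (row + d - 1))
          = pal cs row (row + d) := by
        rw [pal_step cs (show row < row + d by omega)]
      rw [show row + d + 1 = (row + 1) + d by omega]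
      set dp' := setM dp row (row + d) _ with hdp'
      have hsh' : Shape N dp' := shape_setM hsh _ _ _
      have hinv' : ∀ a b, a < N → b < N →
          (getM dp' a b = true ↔ (a ≤ b ∧ (b + 1 ≤ a + d ∨ (b = a + d ∧ a < row + 1)) ∧ pal cs a b = true)) := by
        intro a b ha hb
        by_cases hc : a = row ∧ b = row + d
        · obtain ⟨rfl, rfl⟩ := hc
          rw [hdp', getM_setM_self hsh (by omega) (by omega), hv]
          constructor
          · intro h3; exact ⟨by omega, Or.inr ⟨by omega, by omega⟩, h3⟩
          · rintro ⟨_, _, h3⟩; exact h3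
        · rw [hdp', getM_setM_ne _ hc, hinv a b ha hb]
          constructor
          · rintro ⟨h1, h2, h3⟩
            refine ⟨h1, ?_, h3⟩
            rcases h2 with h2 | ⟨h2, h2'⟩
            · exact Or.inl h2
            · exact Or.inr ⟨h2, by omega⟩
          · rintro ⟨h1, h2, h3⟩
            refine ⟨h1, ?_, h3⟩
            rcases h2 with h2 | ⟨h2, h2'⟩
            · exact Or.inl h2
            · refine Or.inr ⟨h2, ?_⟩
              rcases Nat.lt_or_ge a row with h | h
              · omega
              · exfalso; exact hc ⟨by omega, by omega⟩
      exact ih (row + 1) dp' (by omega) hsh' hinv'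
    · rw [diagA, dif_neg (by omega)]
      refine ⟨hsh, fun a b ha hb => ?_⟩
      rw [hinv a b ha hb]
      constructor
      · rintro ⟨h1, h2, h3⟩; exact ⟨h1, by omega, h3⟩
      · rintro ⟨h1, h2, h3⟩; exact ⟨h1, by omega, h3⟩

theorem A_loop (cs : List Char) (N : Nat) :
    ∀ k a dp, 2 ≤ a → PA cs N (a - 1) dp →
    PA cs N (a + k - 1) ((List.range' a k).foldl (fun dp j => diagA cs N 0 j dp) dp) := by
  intro k
  induction k with
  | zero =>
    intro a dp _ h
    simpa using h
  | succ k ih =>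
    intro a dp ha hPA
    obtain ⟨hsh, hinv⟩ := hPA
    rw [List.range'_succ, List.foldl_cons]
    have hpre : ∀ x y, x < N → y < N →
        (getM dp x y = true ↔ (x ≤ y ∧ (y + 1 ≤ x + a ∨ (y = x + a ∧ x < 0)) ∧ pal cs x y = true)) := by
      intro x y hx hy
      rw [hinv x y hx hy]
      constructor
      · rintro ⟨h1, h2, h3⟩; exact ⟨h1, Or.inl (by omega), h3⟩
      · rintro ⟨h1, h2, h3⟩
        refine ⟨h1, ?_, h3⟩
        rcases h2 with h2 | ⟨h2, h2'⟩ <;> omega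
    have hstep := diagA_spec cs N a ha N 0 dp (by omega) hsh hpre
    rw [show (0 : Nat) + a = a from by omega] at hstep
    have hnext : PA cs N a (diagA cs N 0 a dp) := ⟨hstep.1, hstep.2⟩
    have hfin := ih (a + 1) _ (by omega) (by
      rw [show a + 1 - 1 = a from by omega]; exact hnext)
    rw [show a + 1 + k - 1 = a + (k + 1) - 1 from by omega] at hfin
    exact hfin

theorem good_A (s : String) (h : s.toList ≠ []) :
    Good s.toList s.toList.length (getDP s) := by
  set cs := s.toList with hcs
  set N := cs.length with hN
  have hN1 : 1 ≤ N := List.length_pos_iff.mpr h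
  have hgd : getDP s = (List.range' 2 (N - 2)).foldl (fun dp j => diagA cs N 0 j dp)
      (setM ((List.range (N - 1)).foldl (fun dp i =>
        setM (setM dp i i true) i (i + 1) (cs.getD i ' ' == cs.getD (i + 1) ' '))
        (List.replicate N (List.replicate N false))) (N - 1) (N - 1) true) := rfl
  have hinit := A_init cs N hN1
  rcases Nat.lt_or_ge N 2 with h2 | h2
  · -- N = 1 : the range' loop is empty
    have hN' : N = 1 := by omega
    have hempty : N - 2 = 0 := by omega
    rw [hgd, hempty]
    simp only [List.range'_zero, List.foldl_nil]
    obtain ⟨hsh, hinv⟩ := hinit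
    refine ⟨hsh, fun a b ha hb => ?_⟩
    rw [hinv a b ha hb]
    constructor
    · rintro ⟨h1, _, h3⟩; exact ⟨h1, h3⟩
    · rintro ⟨h1, h3⟩; exact ⟨h1, by omega, h3⟩
  · have := A_loop cs N (N - 2) 2 _ (le_refl 2) hinit
    rw [show 2 + (N - 2) - 1 = N - 1 by omega] at this
    rw [hgd]
    obtain ⟨hsh, hinv⟩ := this
    refine ⟨hsh, fun a b ha hb => ?_⟩
    rw [hinv a b ha hb]
    constructor
    · rintro ⟨h1, _, h3⟩; exact ⟨h1, h3⟩
    · rintro ⟨h1, h3⟩; exact ⟨h1, by omega, h3⟩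

-- ===== B side =====

theorem expandB_spec (cs : List Char) (N : Nat) :
    ∀ fuel (m : Int) (Old : Nat → Nat → Prop) (l : Int) (r : Nat) dp,
    N ≤ r + fuel → Shape N dp → l + (r : Int) = m → l < (r : Int) →
    (0 ≤ l → pal cs (l.toNat + 1) (r - 1) = true) →
    (∀ a b, a < N → b < N → (getM dp a b = true ↔ Old a b)) →
    Shape N (expandB cs N l r dp) ∧
    ∀ a b, a < N → b < N →
      (getM (expandB cs N l r dp) a b = true ↔
        (Old a b ∨ ((a : Int) + (b : Int) = m ∧ (a : Int) ≤ l ∧ pal cs a b = true))) := by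
  intro fuel
  induction fuel with
  | zero =>
    intro m Old l r dp hfuel hsh hm hlr _ hinv
    rw [expandB, dif_neg (by omega)]
    refine ⟨hsh, fun a b ha hb => ?_⟩
    rw [hinv a b ha hb]
    constructor
    · exact Or.inl
    · rintro (h | ⟨h1, h2, _⟩)
      · exact h
      · exfalso; omega
  | succ fuel ih =>
    intro m Old l r dp hfuel hsh hm hlr hin hinv
    by_cases hcond : 0 ≤ l ∧ r < N ∧ cs.getD l.toNat ' ' == cs.getD r ' '
    · rw [expandB, dif_pos hcond]
      obtain ⟨hl0, hrN, heq⟩ := hcond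
      have hlr' : l.toNat < r := by omega
      have hpal : pal cs l.toNat r = true := by
        rw [pal_step cs hlr', heq, hin hl0]; rfl
      set dp' := setM dp l.toNat r true with hdp'
      have hsh' : Shape N dp' := shape_setM hsh _ _ _
      have hinv' : ∀ a b, a < N → b < N →
          (getM dp' a b = true ↔ (Old a b ∨ (a = l.toNat ∧ b = r))) := by
        intro a b ha hb
        by_cases hc : a = l.toNat ∧ b = r
        · obtain ⟨rfl, rfl⟩ := hc
          rw [hdp', getM_setM_self hsh (by omega) hrN]
          simp
        · rw [hdp', getM_setM_ne _ hc, hinv a b ha hb]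
          constructor
          · exact Or.inl
          · rintro (h | h); · exact h
            · exact absurd h hc
      have hin' : 0 ≤ l - 1 → pal cs ((l - 1).toNat + 1) (r + 1 - 1) = true := by
        intro hl1
        rw [show (l - 1).toNat + 1 = l.toNat by omega, show r + 1 - 1 = r by omega]
        exact hpal
      obtain ⟨hshf, hinvf⟩ := ih m (fun a b => Old a b ∨ (a = l.toNat ∧ b = r))
        (l - 1) (r + 1) dp' (by omega) hsh' (by push_cast at hm ⊢; omega)
        (by push_cast at hlr ⊢; omega) hin' hinv'
      refine ⟨hshf, fun a b ha hb => ?_⟩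
      rw [hinvf a b ha hb]
      constructor
      · rintro ((h | ⟨rfl, rfl⟩) | ⟨h1, h2, h3⟩)
        · exact Or.inl h
        · exact Or.inr ⟨by omega, by omega, hpal⟩
        · exact Or.inr ⟨h1, by omega, h3⟩
      · rintro (h | ⟨h1, h2, h3⟩)
        · exact Or.inl (Or.inl h)
        · by_cases hc : a = l.toNat ∧ b = r
          · exact Or.inl (Or.inr hc)
          · refine Or.inr ⟨h1, ?_, h3⟩
            rcases Nat.lt_or_ge a l.toNat with h' | h'
            · omega
            · exfalso; exact hc ⟨by omega, by omega⟩
    · rw [expandB, dif_neg hcond]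
      refine ⟨hsh, fun a b ha hb => ?_⟩
      rw [hinv a b ha hb]
      constructor
      · exact Or.inl
      · rintro (h | ⟨h1, h2, h3⟩)
        · exact h
        · exfalso
          by_cases hl0 : 0 ≤ l
          · by_cases hrN : r < N
            · have heqf : (cs.getD l.toNat ' ' == cs.getD r ' ') = false := by
                cases hbe : (cs.getD l.toNat ' ' == cs.getD r ' ')
                · rfl
                · exact absurd ⟨hl0, hrN, hbe⟩ hcond
              have hpf := pal_false cs l.toNat r (by omega) heqf a b (by omega) (by omega)
              rw [h3] at hpf
              simp at hpf
            · omega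
          · omega

def QB (cs : List Char) (N i : Nat) (dp : List (List Bool)) : Prop :=
  Shape N dp ∧ ∀ a b, a < N → b < N →
    (getM dp a b = true ↔ (a ≤ b ∧ pal cs a b = true ∧ a + b + 1 ≤ 2 * i))

theorem B_step (cs : List Char) (N i : Nat) (hiN : i < N) (dp : List (List Bool))
    (h : QB cs N i dp) :
    QB cs N (i + 1)
      (expandB cs N ((i : Int)) (i + 1) (expandB cs N ((i : Int) - 1) (i + 1) (setM dp i i true))) := by
  obtain ⟨hsh, hinv⟩ := h
  have hshA : Shape N (setM dp i i true) := shape_setM hsh _ _ _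
  have hinvA : ∀ a b, a < N → b < N →
      (getM (setM dp i i true) a b = true ↔
        ((a ≤ b ∧ pal cs a b = true ∧ a + b + 1 ≤ 2 * i) ∨ (a = i ∧ b = i))) := by
    intro a b ha hb
    by_cases hc : a = i ∧ b = i
    · obtain ⟨rfl, rfl⟩ := hc
      rw [getM_setM_self hsh hiN hiN]
      simp
    · rw [getM_setM_ne _ hc, hinv a b ha hb]
      constructor
      · exact Or.inl
      · rintro (h | h); · exact h
        · exact absurd h hc
  have hodd := expandB_spec cs N N (2 * (i : Int)) _ ((i : Int) - 1) (i + 1) (setM dp i i true)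
      (by omega) hshA (by push_cast; omega) (by push_cast; omega)
      (by intro hl
          rw [show ((i : Int) - 1).toNat + 1 = i by omega, show i + 1 - 1 = i by omega]
          exact pal_le cs (le_refl i))
      hinvA
  obtain ⟨hsh1, hinv1⟩ := hodd
  have heven := expandB_spec cs N N (2 * (i : Int) + 1) _ ((i : Int)) (i + 1)
      (expandB cs N ((i : Int) - 1) (i + 1) (setM dp i i true))
      (by omega) hsh1 (by push_cast; omega) (by push_cast; omega)
      (by intro _
          rw [show ((i : Int)).toNat + 1 = i + 1 by omega]
          exact pal_le cs (by omega))
      hinv1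
  obtain ⟨hsh2, hinv2⟩ := heven
  refine ⟨hsh2, fun a b ha hb => ?_⟩
  rw [hinv2 a b ha hb]
  constructor
  · rintro (((⟨h1, h2, h3⟩ | ⟨rfl, rfl⟩) | ⟨h1, h2, h3⟩) | ⟨h1, h2, h3⟩)
    · exact ⟨h1, h2, by omega⟩
    · exact ⟨le_refl _, pal_le cs (le_refl _), by omega⟩
    · exact ⟨by omega, h3, by omega⟩
    · exact ⟨by omega, h3, by omega⟩
  · rintro ⟨h1, h2, h3⟩
    rcases Nat.lt_or_ge (a + b + 1) (2 * i + 1) with hc | hc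
    · exact Or.inl (Or.inl (Or.inl ⟨h1, h2, by omega⟩))
    · rcases Nat.lt_or_ge (a + b) (2 * i + 1) with hc2 | hc2
      · -- a + b = 2 * i
        by_cases hab : a = b
        · exact Or.inl (Or.inl (Or.inr ⟨by omega, by omega⟩))
        · exact Or.inl (Or.inr ⟨by omega, by omega, h2⟩)
      · -- a + b = 2 * i + 1
        exact Or.inr ⟨by omega, by omega, h2⟩

theorem B_loop (cs : List Char) (N : Nat) :
    ∀ n, n ≤ N →
    QB cs N n ((List.range n).foldl (fun dp (i : Nat) =>
        expandB cs N ((i : Int)) (i + 1) (expandB cs N ((i : Int) - 1) (i + 1) (setM dp i i true)))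
        (List.replicate N (List.replicate N false))) := by
  intro n
  induction n with
  | zero =>
    intro _
    refine ⟨shape_dp0 N, fun a b _ _ => ?_⟩
    simp only [List.range_zero, List.foldl_nil]
    rw [getM_dp0]
    constructor
    · intro h; simp at h
    · rintro ⟨_, _, h3⟩; omega
  | succ n ih =>
    intro hn
    rw [List.range_succ, List.foldl_append]
    simp only [List.foldl_cons, List.foldl_nil]
    exact B_step cs N n (by omega) _ (ih (by omega))

theorem good_B (s : String) :
    Good s.toList s.toList.length (getDP_alt s) := by
  set cs := s.toList with hcs
  set N := cs.length with hN
  have hgd : getDP_alt s = (List.range N).foldl (fun dp (i : Nat) =>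
      expandB cs N ((i : Int)) (i + 1) (expandB cs N ((i : Int) - 1) (i + 1) (setM dp i i true)))
      (List.replicate N (List.replicate N false)) := rfl
  rw [hgd]
  obtain ⟨hsh, hinv⟩ := B_loop cs N N (le_refl N)
  refine ⟨hsh, fun a b ha hb => ?_⟩
  rw [hinv a b ha hb]
  constructor
  · rintro ⟨h1, h2, _⟩; exact ⟨h1, h2⟩
  · rintro ⟨h1, h2⟩; exact ⟨h1, h2, by omega⟩

-- ===== VERDICT (by name: the statement is the Claim_ definition above) =====
theorem getDP_spec : Claim_equal_getDP := by
  intro s _ hpre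
  have hne : s.toList ≠ [] := by
    intro hc; exact hpre (String.toList_eq_nil_iff.mp hc)
  obtain ⟨hsa, ha⟩ := good_A s hne
  obtain ⟨hsb, hb⟩ := good_B s
  show getDP s = getDP_alt s
  refine mat_ext hsa hsb ?_
  intro i j hi hj
  apply bool_ext
  rw [ha i j hi hj, hb i j hi hj]
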